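-- pv_equiv track=rewrite | github.com/Wimull/Turing-USP-Techinical-Case | Q2B.py | estado_atual
-- ===== SOURCE A (Python) =====
-- def estado_atual(TAMANHO, horários, INSTANTE):
--     class Carro:                                  #Defines a class (cars) with an id, moment of entry and position in the parking lot
--         def __init__(self, entrada, id):
--             self.entrada = entrada
--             self.id = id
--             self.posição = 0
--
--         def position(self, momento):
--             self.posição = momento - self.entrada #Uptades the position of the car based on the rule that the car moves one position in the parking lot each instant
--             if (self.posição < TAMANHO) & (self.posição > -1): return self.posição
--             return -1                             #Calculates the position of the car based on the instant given or, if the car has moved out of the parking lot, returns -1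
--
--
--     estacionamento = []                           #Defines a parking lot as an array of length "TAMANHO" filled with 0's
--     for x in range(0, TAMANHO):
--         estacionamento.append(0)
--
--     for i in range(1, len(horários) + 1):
--         i = Carro(horários[i - 1], i)
--         if i.position(INSTANTE) > -1:
--             estacionamento[i.position(INSTANTE)] = i.id
--     return estacionamento                         #Returns an array with the id of the car in that position, or zero if that position is empty
-- ===== SOURCE B (Python) =====
-- def estado_atual(TAMANHO, horários, INSTANTE):
--     by_time = {}
--     for j, t in enumerate(horários):
--         by_time[t] = j + 1
--     return [by_time.get(INSTANTE - p, 0) for p in range(TAMANHO)]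
-- ===== Notes on version B (the rewrite author's own statement) =====
-- stated objective: simpler
-- what changed: Drops the inner Carro class and the mutate-a-zeros-array loop: B builds one dict from entry time to car id (later duplicates overwrite, so the largest id wins) and produces the result directly as a comprehension looking up INSTANTE - p for each position p.
import Mathlib
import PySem

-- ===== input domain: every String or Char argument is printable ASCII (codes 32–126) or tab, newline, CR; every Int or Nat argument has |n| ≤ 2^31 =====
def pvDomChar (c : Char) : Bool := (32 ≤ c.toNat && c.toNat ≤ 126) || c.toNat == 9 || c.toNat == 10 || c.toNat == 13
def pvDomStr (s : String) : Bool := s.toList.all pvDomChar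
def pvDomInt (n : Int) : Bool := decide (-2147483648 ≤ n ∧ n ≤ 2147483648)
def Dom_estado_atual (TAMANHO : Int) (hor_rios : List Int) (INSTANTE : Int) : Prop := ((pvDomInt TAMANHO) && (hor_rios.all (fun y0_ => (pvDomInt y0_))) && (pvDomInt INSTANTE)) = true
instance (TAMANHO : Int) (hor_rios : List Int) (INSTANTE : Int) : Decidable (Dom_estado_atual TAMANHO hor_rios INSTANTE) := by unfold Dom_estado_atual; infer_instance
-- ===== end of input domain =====

-- B replaces A's inner Carro class and zeros-array mutation loop by a dict from
-- entry time to car id plus a direct per-position lookup (objective: simpler).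

-- ===== PORT A =====
-- Python's mutable list is modeled by Array (O(1) append / in-place store);
-- the guard makes 0 ≤ posição < TAMANHO = length, so setIfInBounds is exact here.
def estado_atual (TAMANHO : Int) (hor_rios : List Int) (INSTANTE : Int) : List Int :=
  -- estacionamento = []; for x in range(0, TAMANHO): estacionamento.append(0)
  let estacionamento : Array Int := (PySem.List.pyRange 0 TAMANHO 1).foldl (fun acc _ => acc.push 0) #[]
  -- for i in range(1, len(horários)+1): i = Carro(horários[i-1], i); if i.position(INSTANTE) > -1: estacionamento[i.position(INSTANTE)] = i.id
  ((PySem.List.pyRange 1 ((hor_rios.length : Int) + 1) 1).foldl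
    (fun est i =>
      let posição := INSTANTE - PySem.List.pyGetD hor_rios (i - 1) 0
      if posição < TAMANHO ∧ posição > -1 then est.setIfInBounds posição.toNat i else est)
    estacionamento).toList

-- ===== PORT B =====
def estado_atual_alt (TAMANHO : Int) (hor_rios : List Int) (INSTANTE : Int) : List Int :=
  -- by_time = {}; for j, t in enumerate(horários): by_time[t] = j + 1
  let by_time := (PySem.List.enumerate hor_rios).foldl
    (fun d q => d.insert q.2 (q.1 + 1)) (PySem.Dict.empty : PySem.Dict Int Int)
  -- [by_time.get(INSTANTE - p, 0) for p in range(TAMANHO)]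
  (PySem.List.pyRange 0 TAMANHO 1).map (fun p => by_time.getD (INSTANTE - p) 0)

-- ===== PRECONDITION & SPEC =====
def Spec_estado_atual (TAMANHO : Int) (hor_rios : List Int) (INSTANTE : Int) (out : List Int) : Prop := out = estado_atual_alt TAMANHO hor_rios INSTANTE
instance (TAMANHO : Int) (hor_rios : List Int) (INSTANTE : Int) (out : List Int) : Decidable (Spec_estado_atual TAMANHO hor_rios INSTANTE out) := by unfold Spec_estado_atual; infer_instance

-- ===== CLAIM (what is proved, stated in full; the proofs are below) =====
def Claim_equal_estado_atual : Prop := ∀ (TAMANHO : Int) (hor_rios : List Int) (INSTANTE : Int), Dom_estado_atual TAMANHO hor_rios INSTANTE → Spec_estado_atual TAMANHO hor_rios INSTANTE (estado_atual TAMANHO hor_rios INSTANTE)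

-- ===== LEMMAS AND PROOFS =====

-- the zeros-building loop appends TAMANHO zeros
lemma pv_zeros (l : List Int) (a : Array Int) :
    (l.foldl (fun acc _ => acc.push (0 : Int)) a).toList = a.toList ++ l.map (fun _ => (0 : Int)) := by
  induction l generalizing a with
  | nil => simp
  | cons x xs ih => rw [List.foldl_cons, ih]; simp

-- the Array-mutating loop of port A, read through toList, is the same loop on lists
lemma pv_arr (TAMANHO INSTANTE : Int) (xs : List Int) (l : List Int) (a : Array Int) :
    ((l.foldl (fun est i =>
        let posição := INSTANTE - PySem.List.pyGetD xs (i - 1) 0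
        if posição < TAMANHO ∧ posição > -1 then est.setIfInBounds posição.toNat i else est) a).toList)
    = l.foldl (fun est i =>
        let posição := INSTANTE - PySem.List.pyGetD xs (i - 1) 0
        if posição < TAMANHO ∧ posição > -1 then est.set posição.toNat i else est) a.toList := by
  induction l generalizing a with
  | nil => rfl
  | cons x l ih =>
      simp only [List.foldl_cons]
      split_ifs with h
      · rw [ih, Array.toList_setIfInBounds]
      · exact ih a

-- core invariant: A's array after processing xs equals B's per-position dict lookup
lemma pv_main (TAMANHO INSTANTE : Int) (xs : List Int) :
    (PySem.List.pyRange 1 ((xs.length : Int) + 1) 1).foldl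
      (fun est i =>
        let posição := INSTANTE - PySem.List.pyGetD xs (i - 1) 0
        if posição < TAMANHO ∧ posição > -1 then est.set posição.toNat i else est)
      ((PySem.List.pyRange 0 TAMANHO 1).map (fun _ => (0 : Int)))
    = (PySem.List.pyRange 0 TAMANHO 1).map (fun p =>
        ((PySem.List.enumerate xs).foldl (fun d q => d.insert q.2 (q.1 + 1))
          (PySem.Dict.empty : PySem.Dict Int Int)).getD (INSTANTE - p) 0) := by
  induction xs using List.reverseRecOn with
  | nil =>
      simp [PySem.List.pyRange_one_eq_nil, PySem.List.enumerate]
  | append_singleton ys t ih =>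
      have hlen : (((ys ++ [t]).length : Int) + 1) = ((ys.length : Int) + 1) + 1 := by
        simp
      rw [hlen, PySem.List.pyRange_one_succ_right (by omega), List.foldl_append]
      have hcongr :
          (PySem.List.pyRange 1 ((ys.length : Int) + 1) 1).foldl
            (fun est i =>
              let posição := INSTANTE - PySem.List.pyGetD (ys ++ [t]) (i - 1) 0
              if posição < TAMANHO ∧ posição > -1 then est.set posição.toNat i else est)
            ((PySem.List.pyRange 0 TAMANHO 1).map (fun _ => (0 : Int)))
          = (PySem.List.pyRange 1 ((ys.length : Int) + 1) 1).foldl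
            (fun est i =>
              let posição := INSTANTE - PySem.List.pyGetD ys (i - 1) 0
              if posição < TAMANHO ∧ posição > -1 then est.set posição.toNat i else est)
            ((PySem.List.pyRange 0 TAMANHO 1).map (fun _ => (0 : Int))) := by
        apply PySem.List.foldl_congr_mem
        intro est i hi
        rw [PySem.List.mem_pyRange_one] at hi
        have hget : PySem.List.pyGetD (ys ++ [t]) (i - 1) 0 = PySem.List.pyGetD ys (i - 1) 0 := by
          rw [PySem.List.pyGetD_of_nonneg _ 0 (by omega), PySem.List.pyGetD_of_nonneg _ 0 (by omega)]
          simp only [List.getD]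
          rw [List.getElem?_append_left (by omega)]
        simp only [hget]
      rw [hcongr, ih]
      -- the last step: car (ys.length + 1) with entry time t
      have hgett : PySem.List.pyGetD (ys ++ [t]) ((ys.length : Int) + 1 - 1) 0 = t := by
        rw [PySem.List.pyGetD_of_nonneg _ 0 (by omega)]
        have hnat : ((ys.length : Int) + 1 - 1).toNat = ys.length := by omega
        simp [List.getD]
      have henum : PySem.List.enumerate (ys ++ [t]) =
          PySem.List.enumerate ys ++ [((ys.length : Int), t)] := by
        rw [PySem.List.enumerate_append]
        simp [PySem.List.enumerate]
      simp only [hgett, henum, List.foldl_append, List.foldl_cons, List.foldl_nil]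
      set d := (PySem.List.enumerate ys).foldl (fun d q => d.insert q.2 (q.1 + 1))
        (PySem.Dict.empty : PySem.Dict Int Int) with hd
      by_cases h : INSTANTE - t < TAMANHO ∧ INSTANTE - t > -1
      · rw [if_pos h]
        apply List.ext_getElem
        · simp
        · intro n h1 h2
          have hn : n < (TAMANHO - 0).toNat := by simpa using h2
          simp only [List.getElem_set, List.getElem_map, PySem.List.getElem_pyRange_one,
            PySem.Dict.getD_insert, zero_add]
          split_ifs with c1 c2 c2
          · rfl
          · exfalso; omega
          · exfalso; omega
          · rfl
      · rw [if_neg h]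
        apply List.map_congr_left
        intro p hp
        rw [PySem.List.mem_pyRange_one] at hp
        rw [PySem.Dict.getD_insert, if_neg (by omega)]

-- ===== VERDICT (by name: the statement is the Claim_ definition above) =====
theorem estado_atual_spec : Claim_equal_estado_atual := by
  intro TAMANHO hor_rios INSTANTE _
  unfold Spec_estado_atual estado_atual estado_atual_alt
  rw [pv_arr, pv_zeros]
  simp only [List.nil_append]
  exact pv_main TAMANHO INSTANTE hor_rios
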